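-- pv_equiv track=rewrite | github.com/mistervaibhav/data-structures-and-algorithms | recursion/all_strings_with_spaces.py | spaceString
-- ===== SOURCE A (Python) =====
-- def spaceString(string):
--     """
--     finds all possible strings that can be made by placing spaces (zero or one) in between them.
--
--     https://practice.geeksforgeeks.org/problems/print-all-possible-strings/1
--     """
--
--     if len(string) == 0:
--         return []
--
--     if len(string) == 1:
--         return [string]
--
--     output = list()
--
--     smallOutput = spaceString(string[1:])
--
--     for smallString in smallOutput:
--         output.append(string[0] + smallString)
--         output.append(string[0] + " " + smallString)
--
--     output.sort()
--
--     return output[::-1]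
-- ===== SOURCE B (Python) =====
-- def spaceString(string):
--     """
--     finds all possible strings that can be made by placing spaces (zero or one) in between them.
--
--     Iterative: build all variants in one right-to-left pass, then sort once (descending),
--     instead of recursing and re-sorting at every level.
--     """
--     if len(string) == 0:
--         return []
--     variants = [string[-1]]
--     for ch in reversed(string[:-1]):
--         variants = [ch + v for v in variants] + [ch + ' ' + v for v in variants]
--     return sorted(variants, reverse=True)
-- ===== Notes on version B (the rewrite author's own statement) =====
-- stated objective: alternative
-- what changed: Replaces A's recursion that interleaves and re-sorts the variant list at every recursion level with a single iterative right-to-left pass building all variants followed by one final descending sort.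
import Mathlib
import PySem

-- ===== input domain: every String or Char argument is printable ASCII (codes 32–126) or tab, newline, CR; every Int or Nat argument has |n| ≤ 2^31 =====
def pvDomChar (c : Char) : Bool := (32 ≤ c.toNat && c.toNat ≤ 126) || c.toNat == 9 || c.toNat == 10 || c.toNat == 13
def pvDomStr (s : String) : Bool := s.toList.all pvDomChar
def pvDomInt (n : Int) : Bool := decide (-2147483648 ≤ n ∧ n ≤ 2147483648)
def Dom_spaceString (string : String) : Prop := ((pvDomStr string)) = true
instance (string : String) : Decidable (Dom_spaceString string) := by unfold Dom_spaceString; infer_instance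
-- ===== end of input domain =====

-- B replaces A's recursion with per-level re-sorts by one iterative right-to-left pass that
-- builds all variants and a single final descending sort (objective: alternative).

-- ===== PORT A =====
-- A's recursion, on the string's character list (Python strings ported as List Char and
-- wrapped back to String at the end; '+' on str is '::' on the lists).
def spaceStringA : List Char → List (List Char)
  | [] => []                                   -- if len(string) == 0: return []
  | [c] => [[c]]                               -- if len(string) == 1: return [string]
  | c :: d :: rest =>
      let smallOutput := spaceStringA (d :: rest)        -- spaceString(string[1:])
      let output := smallOutput.foldl
        (fun acc smallString => acc ++ [c :: smallString, c :: ' ' :: smallString]) []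
      -- output.sort(); return output[::-1]
      (PySem.List.slice? (PySem.List.sorted output (fun x => x) false) none none (-1)).getD []

def spaceString (string : String) : List String :=
  (spaceStringA string.toList).map String.ofList

-- ===== PORT B =====
-- Source B's loop body: variants = [ch+v for v in variants] + [ch+' '+v for v in variants]
def spaceStringAltStep (vs : List (List Char)) (ch : Char) : List (List Char) :=
  vs.map (fun v => ch :: v) ++ vs.map (fun v => ch :: ' ' :: v)

def spaceString_alt (string : String) : List String :=
  match PySem.List.pyGet? string.toList (-1) with      -- string[-1] (none ↔ empty string)
  | none => []                                 -- if len(string) == 0: return []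
  | some last =>                               -- variants = [string[-1]]
      -- for ch in reversed(string[:-1]): …
      let variants := ((PySem.List.slice string.toList none (some (-1))).reverse).foldl
        spaceStringAltStep [[last]]
      -- return sorted(variants, reverse=True)
      (PySem.List.sorted variants (fun x => x) true).map String.ofList

-- ===== PRECONDITION & SPEC =====
def Spec_spaceString (string : String) (out : List String) : Prop := out = spaceString_alt string
instance (string : String) (out : List String) : Decidable (Spec_spaceString string out) := by unfold Spec_spaceString; infer_instance

-- ===== CLAIM (what is proved, stated in full; the proofs are below) =====
def Claim_equal_spaceString : Prop := ∀ (string : String), Dom_spaceString string → Spec_spaceString string (spaceString string)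

-- ===== LEMMAS AND PROOFS =====

-- canonical (unsorted) list of all space-insertion variants, in B's generation order
def pvVariants : List Char → List (List Char)
  | [] => []
  | [c] => [[c]]
  | c :: d :: rest =>
      (pvVariants (d :: rest)).map (fun v => c :: v) ++
      (pvVariants (d :: rest)).map (fun v => c :: ' ' :: v)

-- the LT/DecidableLT instances the ports' elaboration picked, re-expressed through the
-- LinearOrder instance the PySem order lemmas are stated with (definitionally equal)
theorem pvSortInst (l : List (List Char)) (rev : Bool) :
    PySem.List.sorted l (fun x => x) rev
      = @PySem.List.sorted (List Char) (List Char) List.instLinearOrder.toLT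
          LinearOrder.toDecidableLT l (fun x => x) rev := by
  have h : (List.instLT : LT (List Char)) = List.instLinearOrder.toLT := rfl
  congr 1

-- any two lists that are permutations of each other have the same descending sort
theorem pvSortedRev_eq_of_perm (l₁ l₂ : List (List Char)) (h : l₁.Perm l₂) :
    PySem.List.sorted l₁ (fun x => x) true = PySem.List.sorted l₂ (fun x => x) true := by
  rw [pvSortInst, pvSortInst]
  apply List.Perm.eq_of_pairwise (le := fun a b : List Char => b ≤ a)
  · intro a b _ _ h1 h2; exact le_antisymm h2 h1
  · exact PySem.List.sorted_pairwise_rev l₁ (fun x => x)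
  · exact PySem.List.sorted_pairwise_rev l₂ (fun x => x)
  · rw [← pvSortInst, ← pvSortInst]
    exact (PySem.List.sorted_perm l₁ (fun x => x) true).trans
      (h.trans (PySem.List.sorted_perm l₂ (fun x => x) true).symm)

-- A's 'sort ascending then reverse' is the descending sort
theorem pvReverse_sorted (l : List (List Char)) :
    (PySem.List.sorted l (fun x => x) false).reverse = PySem.List.sorted l (fun x => x) true := by
  rw [pvSortInst, pvSortInst]
  apply List.Perm.eq_of_pairwise (le := fun a b : List Char => b ≤ a)
  · intro a b _ _ h1 h2; exact le_antisymm h2 h1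
  · exact (List.pairwise_reverse).mpr
      ((PySem.List.sorted_pairwise l (fun x => x)).imp (fun h => h))
  · exact PySem.List.sorted_pairwise_rev l (fun x => x)
  · rw [← pvSortInst, ← pvSortInst]
    exact ((PySem.List.sorted l (fun x => x) false).reverse_perm.trans
      (PySem.List.sorted_perm l (fun x => x) false)).trans
      (PySem.List.sorted_perm l (fun x => x) true).symm

-- A's interleaving loop produces a permutation of the two map-blocks
theorem pvFoldl_interleave_perm (c : Char) (l acc : List (List Char)) :
    (l.foldl (fun acc v => acc ++ [c :: v, c :: ' ' :: v]) acc).Perm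
      (acc ++ (l.map (fun v => c :: v) ++ l.map (fun v => c :: ' ' :: v))) := by
  induction l generalizing acc with
  | nil => simp
  | cons v t ih =>
      refine (ih (acc ++ [c :: v, c :: ' ' :: v])).trans ?_
      simp only [List.map_cons, List.append_assoc]
      refine List.Perm.append_left acc ?_
      have h2 : ((c :: v) :: (c :: ' ' :: v) ::
            (t.map (fun v => c :: v) ++ t.map (fun v => c :: ' ' :: v))).Perm
          ((c :: v) :: (t.map (fun v => c :: v) ++ (c :: ' ' :: v) :: t.map (fun v => c :: ' ' :: v))) :=
        List.Perm.cons _ List.perm_middle.symm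
      simpa using h2

-- A computes the descending sort of the canonical variant list
theorem pvA_eq_sortedRev (cs : List Char) (h : cs ≠ []) :
    spaceStringA cs = PySem.List.sorted (pvVariants cs) (fun x => x) true := by
  match cs with
  | [c] => rfl
  | c :: d :: rest =>
      have ih := pvA_eq_sortedRev (d :: rest) (by simp)
      have hperm : ((spaceStringA (d :: rest)).foldl
            (fun acc v => acc ++ [c :: v, c :: ' ' :: v]) []).Perm (pvVariants (c :: d :: rest)) := by
        refine (pvFoldl_interleave_perm c (spaceStringA (d :: rest)) []).trans ?_
        simp only [List.nil_append, pvVariants]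
        have hp : (spaceStringA (d :: rest)).Perm (pvVariants (d :: rest)) := by
          rw [ih]; exact PySem.List.sorted_perm _ _ _
        exact (hp.map _).append (hp.map _)
      show (PySem.List.slice? _ none none (-1)).getD [] = _
      rw [PySem.List.slice?_none_none_neg_one, Option.getD_some, pvReverse_sorted]
      exact pvSortedRev_eq_of_perm _ _ hperm

-- string[-1] is getLast?
theorem pvPyGet_neg_one (cs : List Char) : PySem.List.pyGet? cs (-1) = cs.getLast? := by
  cases cs with
  | nil => rfl
  | cons a t =>
      simp [PySem.List.pyGet?, PySem.List.pyIdx?, List.getLast?_eq_getElem?]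

-- B's right-to-left fold over the first n-1 characters builds exactly the canonical variant list
theorem pvB_fold_eq_variants (cs : List Char) (h : cs ≠ []) :
    (cs.dropLast.reverse.foldl spaceStringAltStep [[cs.getLast h]]) = pvVariants cs := by
  match cs with
  | [c] => rfl
  | c :: d :: rest =>
      have ih := pvB_fold_eq_variants (d :: rest) (by simp)
      have hlast : (c :: d :: rest).getLast h = (d :: rest).getLast (by simp) :=
        List.getLast_cons _
      have hdrop : (c :: d :: rest).dropLast.reverse
          = (d :: rest).dropLast.reverse ++ [c] := by
        rw [List.dropLast_cons_of_ne_nil (by simp)]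
        simp
      rw [hlast, hdrop, List.foldl_append, ih]
      rfl

-- ===== VERDICT (by name: the statement is the Claim_ definition above) =====
theorem spaceString_spec : Claim_equal_spaceString := by
  intro s _
  unfold Spec_spaceString spaceString spaceString_alt
  cases hs : s.toList with
  | nil => rfl
  | cons a t =>
      have hne : (a :: t) ≠ [] := by simp
      have hl : PySem.List.pyGet? (a :: t) (-1) = some ((a :: t).getLast hne) := by
        rw [pvPyGet_neg_one]; exact List.getLast?_eq_some_getLast hne
      rw [hl]
      simp only [PySem.List.slice_to_neg_one]
      rw [pvB_fold_eq_variants (a :: t) hne, pvA_eq_sortedRev (a :: t) hne]
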